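-- pv_equiv track=rewrite | github.com/ZadniproIon/Zadnipro_Ion_IA232_TA_Teza_an | Winnowing.py | find_winnow_matches
-- ===== SOURCE A (Python) =====
-- from collections import deque, defaultdict
--
-- def rolling_hash(s: str, base: int = 256, mod: int = 2**64) -> int:
--     h = 0
--     for c in s:
--         h = (h * base + ord(c)) % mod
--     return h
--
-- def winnow(text: str, k: int = 7, w: int = 5) -> list[tuple[int,int]]:
--     n = len(text)
--     if n < k:
--         return []
--     hashes = [rolling_hash(text[i:i+k]) for i in range(n - k + 1)]
--     dq = deque()
--     fingerprints = []
--     for i, h in enumerate(hashes):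
--         while dq and dq[-1][0] >= h:
--             dq.pop()
--         dq.append((h, i))
--         if i >= w and dq[0][1] <= i - w:
--             dq.popleft()
--         if i >= w - 1:
--             fingerprints.append((dq[0][0], dq[0][1]))
--     # elimin duplicate consecutive
--     res, prev = [], None
--     for f in fingerprints:
--         if f != prev:
--             res.append(f)
--         prev = f
--     return res
--
-- def find_winnow_matches(susp: str, src: str, k: int, w: int) -> list[tuple[int,int,int]]:
--     fp_s = winnow(susp, k, w)
--     fp_x = winnow(src,   k, w)
--     src_map = defaultdict(list)
--     for h, pos in fp_x:
--         src_map[h].append(pos)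
--
--     matches, seen = [], set()
--     for h, spos in fp_s:
--         for xpos in src_map.get(h, []):
--             key = (spos, xpos)
--             if key not in seen:
--                 seen.add(key)
--                 matches.append((spos, k, xpos))
--     return matches
-- ===== SOURCE B (Python) =====
-- def _kgram_hashes(text, k):
--     # hash of each k-gram, computed incrementally (rolling update) instead of rehashing
--     n = len(text)
--     if k <= 0:
--         return [0] * (n - k + 1)
--     MOD = 1 << 64
--     h = 0
--     for c in text[:k]:
--         h = (h * 256 + ord(c)) % MOD
--     out = [h]
--     top = pow(256, k - 1, MOD)
--     for i in range(n - k):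
--         h = ((h - ord(text[i]) * top) * 256 + ord(text[i + k])) % MOD
--         out.append(h)
--     return out
--
-- def _window_argmins(hs, w):
--     # block decomposition (prefix/suffix minima): rightmost argmin of every
--     # width-w window in O(n) total, independent of w
--     n = len(hs)
--     pref = []
--     for i in range(n):
--         pref.append(i if i % w == 0 or hs[i] <= hs[pref[i - 1]] else pref[i - 1])
--     rsuf = []
--     for i in range(n - 1, -1, -1):
--         if i == n - 1 or i % w == w - 1 or hs[i] < hs[rsuf[-1]]:
--             rsuf.append(i)
--         else:
--             rsuf.append(rsuf[-1])
--     suf = list(reversed(rsuf))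
--     return [pref[i] if hs[pref[i]] <= hs[suf[i - w + 1]] else suf[i - w + 1]
--             for i in range(w - 1, n)]
--
-- def _fingerprints(text, k, w):
--     if len(text) < k:
--         return []
--     hs = _kgram_hashes(text, k)
--     fps = []
--     prev = None
--     for b in _window_argmins(hs, w):
--         f = (hs[b], b)
--         if f != prev:
--             fps.append(f)
--         prev = f
--     return fps
--
-- def find_winnow_matches(susp: str, src: str, k: int, w: int) -> list:
--     # fingerprint positions are pairwise distinct, so no (spos, xpos) pair can
--     # repeat: the matches are a plain flat comprehension, no dedup set needed
--     index = {}
--     for h, pos in _fingerprints(src, k, w):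
--         index.setdefault(h, []).append(pos)
--     return [(spos, k, xpos)
--             for h, spos in _fingerprints(susp, k, w)
--             for xpos in index.get(h, [])]
-- ===== Notes on version B (the rewrite author's own statement) =====
-- stated objective: faster
-- what changed: Each k-gram hash is obtained from the previous one by an O(1) rolling-hash update using a precomputed pow(256,k-1,2^64) instead of re-hashing k characters per position; the deque sliding-window minimum is replaced by a block-decomposition prefix/suffix-minima argmin (O(1) per window) with duplicate suppression fused in; and the matching phase drops A's seen-set entirely, emitting a flat comprehension (fingerprint positions are provably pairwise distinct, so no (spos,xpos) key can repeat).
import Mathlib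
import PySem

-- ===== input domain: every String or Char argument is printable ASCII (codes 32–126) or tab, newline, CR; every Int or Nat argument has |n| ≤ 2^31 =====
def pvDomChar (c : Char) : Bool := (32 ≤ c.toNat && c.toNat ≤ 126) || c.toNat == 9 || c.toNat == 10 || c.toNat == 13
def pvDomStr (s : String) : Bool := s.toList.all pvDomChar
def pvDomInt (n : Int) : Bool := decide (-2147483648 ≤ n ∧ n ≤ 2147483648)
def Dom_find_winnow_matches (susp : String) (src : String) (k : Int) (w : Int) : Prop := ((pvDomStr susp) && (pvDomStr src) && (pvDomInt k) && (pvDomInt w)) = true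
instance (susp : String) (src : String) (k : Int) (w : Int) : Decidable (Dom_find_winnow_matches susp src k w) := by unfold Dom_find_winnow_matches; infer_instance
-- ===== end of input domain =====

-- B replaces A's per-position k-character rehash by an O(1) rolling-hash update, the deque
-- sliding-window minimum by a block-decomposition (prefix/suffix minima) argmin, and drops A's
-- seen-set in the matching phase (fingerprint positions are pairwise distinct, proved below) —
-- objective: faster.

-- ===== PORT A =====
def pvRollingHash (s : List Char) (base : Int) (mod : Int) : Int :=
  s.foldl (fun h c => PySem.Int.mod (h * base + (c.toNat : Int)) mod) 0

def pvPopGE (dq : List (Int × Int)) (h : Int) : List (Int × Int) :=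
  if hne : dq = [] then dq
  else if h ≤ (dq.getLast hne).1 then pvPopGE dq.dropLast h else dq
termination_by dq.length
decreasing_by
  simp only [List.length_dropLast]
  have := List.length_pos_of_ne_nil hne
  omega

def pvStepDq (w : Int) (dq0 : List (Int × Int)) (p : Int × Int) : List (Int × Int) :=
  if w ≤ p.1 ∧ ((pvPopGE dq0 p.2 ++ [(p.2, p.1)]).headD (0, 0)).2 ≤ p.1 - w
    then (pvPopGE dq0 p.2 ++ [(p.2, p.1)]).tail
    else pvPopGE dq0 p.2 ++ [(p.2, p.1)]

def pvStepA (w : Int) (st : List (Int × Int) × List (Int × Int)) (p : Int × Int) :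
    List (Int × Int) × List (Int × Int) :=
  (pvStepDq w st.1 p,
   if w - 1 ≤ p.1
     then st.2 ++ [(((pvStepDq w st.1 p).headD (0, 0)).1, ((pvStepDq w st.1 p).headD (0, 0)).2)]
     else st.2)

def pvDedupe (fps : List (Int × Int)) : List (Int × Int) :=
  (fps.foldl (fun (st : List (Int × Int) × Option (Int × Int)) f =>
      (if st.2 ≠ some f then st.1 ++ [f] else st.1, some f)) ([], none)).1

def pvWinnow (text : List Char) (k : Int) (w : Int) : List (Int × Int) :=
  if (text.length : Int) < k then []
  else
    pvDedupe
      (((PySem.List.enumerate ((PySem.List.pyRange 0 ((text.length : Int) - k + 1) 1).map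
          (fun i => pvRollingHash (PySem.List.slice text (some i) (some (i + k))) 256 (2 ^ 64)))).foldl
        (pvStepA w) ([], [])).2)

def find_winnow_matches (susp : String) (src : String) (k : Int) (w : Int) : List (Int × Int × Int) :=
  ((pvWinnow susp.toList k w).foldl
    (fun (st : List (Int × Int × Int) × PySem.Set (Int × Int)) p =>
      (((pvWinnow src.toList k w).foldl
          (fun (d : PySem.Dict Int (List Int)) q => d.modify q.1 [] (· ++ [q.2]))
          PySem.Dict.empty).getD p.1 []).foldl
        (fun (st2 : List (Int × Int × Int) × PySem.Set (Int × Int)) xpos =>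
          if (p.2, xpos) ∉ st2.2 then (st2.1 ++ [(p.2, k, xpos)], PySem.Set.add st2.2 (p.2, xpos))
          else st2) st)
    ([], PySem.Set.empty)).1

-- ===== PORT B =====
def pvH0 (text : List Char) (k : Int) : Int :=
  (PySem.List.slice text none (some k)).foldl
    (fun h c => PySem.Int.mod (h * 256 + (c.toNat : Int)) (2 ^ 64)) 0

def pvKgramStep (text : List Char) (k : Int) (top : Int) (st : Int × List Int) (i : Int) :
    Int × List Int :=
  (PySem.Int.mod ((st.1 - ((PySem.List.pyGetD text i ' ').toNat : Int) * top) * 256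
      + ((PySem.List.pyGetD text (i + k) ' ').toNat : Int)) (2 ^ 64),
   st.2 ++ [PySem.Int.mod ((st.1 - ((PySem.List.pyGetD text i ' ').toNat : Int) * top) * 256
      + ((PySem.List.pyGetD text (i + k) ' ').toNat : Int)) (2 ^ 64)])

def pvKgramHashes (text : List Char) (k : Int) : List Int :=
  if k ≤ 0 then List.replicate (((text.length : Int) - k + 1).toNat) 0
  else ((PySem.List.pyRange 0 ((text.length : Int) - k) 1).foldl
      (pvKgramStep text k (PySem.Int.powMod 256 (k - 1).toNat (2 ^ 64)))
      (pvH0 text k, [pvH0 text k])).2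

def pvPrefList (hs : List Int) (w : Int) : List Int :=
  (PySem.List.pyRange 0 ((hs.length : Int)) 1).foldl
    (fun pr i =>
      pr ++ [if PySem.Int.mod i w = 0 ∨
               PySem.List.pyGetD hs i 0
                 ≤ PySem.List.pyGetD hs (PySem.List.pyGetD pr (i - 1) 0) 0
             then i else PySem.List.pyGetD pr (i - 1) 0]) []

def pvRsufList (hs : List Int) (w : Int) : List Int :=
  (PySem.List.pyRange ((hs.length : Int) - 1) (-1) (-1)).foldl
    (fun rs i =>
      rs ++ [if i = (hs.length : Int) - 1 ∨ PySem.Int.mod i w = w - 1 ∨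
               PySem.List.pyGetD hs i 0
                 < PySem.List.pyGetD hs (PySem.List.pyGetD rs (-1) 0) 0
             then i else PySem.List.pyGetD rs (-1) 0]) []

def pvCombine (hs : List Int) (w : Int) (pref : List Int) (suf : List Int) : List Int :=
  (PySem.List.pyRange (w - 1) ((hs.length : Int)) 1).map
    (fun i =>
      if PySem.List.pyGetD hs (PySem.List.pyGetD pref i 0) 0
           ≤ PySem.List.pyGetD hs (PySem.List.pyGetD suf (i - w + 1) 0) 0
       then PySem.List.pyGetD pref i 0
       else PySem.List.pyGetD suf (i - w + 1) 0)

def pvArgmins (hs : List Int) (w : Int) : List Int :=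
  pvCombine hs w (pvPrefList hs w) ((pvRsufList hs w).reverse)

def pvFpLoop (hs : List Int) (w : Int) : List (Int × Int) :=
  ((pvArgmins hs w).foldl
    (fun (st : List (Int × Int) × Option (Int × Int)) b =>
      (if st.2 ≠ some (PySem.List.pyGetD hs b 0, b)
        then st.1 ++ [(PySem.List.pyGetD hs b 0, b)]
        else st.1,
       some (PySem.List.pyGetD hs b 0, b)))
    ([], none)).1

def pvFingerprints (text : List Char) (k : Int) (w : Int) : List (Int × Int) :=
  if (text.length : Int) < k then [] else pvFpLoop (pvKgramHashes text k) w

def pvSrcIndex (src : List Char) (k : Int) (w : Int) : PySem.Dict Int (List Int) :=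
  (pvFingerprints src k w).foldl
    (fun (d : PySem.Dict Int (List Int)) q => d.modify q.1 [] (· ++ [q.2])) PySem.Dict.empty

def find_winnow_matches_alt (susp : String) (src : String) (k : Int) (w : Int) :
    List (Int × Int × Int) :=
  (pvFingerprints susp.toList k w).flatMap
    (fun f => ((pvSrcIndex src.toList k w).getD f.1 []).map (fun x => (f.2, k, x)))

-- ===== PRECONDITION & SPEC =====
-- Pre_ restricts to the natural domain k ≥ 0: for negative k, A's k-grams come from Python's
-- negative-stop slices text[i:i+k] (read from the END of the string) — an accident of A on a
-- nonsensical k-gram size on which A still returns (see cites). It also excludes w ≤ 0 whenever a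
-- fingerprint loop actually runs (i.e. unless both strings are shorter than k), where A raises
-- IndexError (dq[0] of an emptied deque).
def Pre_find_winnow_matches (susp : String) (src : String) (k : Int) (w : Int) : Prop :=
  0 ≤ k ∧ (1 ≤ w ∨ (PySem.Str.len susp < k ∧ PySem.Str.len src < k))
instance (susp : String) (src : String) (k : Int) (w : Int) :
    Decidable (Pre_find_winnow_matches susp src k w) := by
  unfold Pre_find_winnow_matches; infer_instance

def pvWitness_find_winnow_matches : String × String × Int × Int := ("abcab", "babca", 2, 2)

def Spec_find_winnow_matches (susp : String) (src : String) (k : Int) (w : Int)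
    (out : List (Int × Int × Int)) : Prop := out = find_winnow_matches_alt susp src k w
instance (susp : String) (src : String) (k : Int) (w : Int) (out : List (Int × Int × Int)) :
    Decidable (Spec_find_winnow_matches susp src k w out) := by
  unfold Spec_find_winnow_matches; infer_instance

-- ===== CLAIM (what is proved, stated in full; the proofs are below) =====
def Claim_equal_find_winnow_matches : Prop := ∀ (susp : String) (src : String) (k : Int) (w : Int), Dom_find_winnow_matches susp src k w → Pre_find_winnow_matches susp src k w → Spec_find_winnow_matches susp src k w (find_winnow_matches susp src k w)

-- ===== LEMMAS AND PROOFS =====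

-- ---- the common hash specification ----
def pvH (l : List Char) : Int := l.foldl (fun a c => a * 256 + (c.toNat : Int)) 0

def pvWSpec (t : List Char) (K : Nat) (j : Nat) : Int := pvH ((t.drop j).take K) % 2 ^ 64

lemma pvH_gen (l : List Char) (a : Int) :
    l.foldl (fun h c => h * 256 + (c.toNat : Int)) a = a * 256 ^ l.length + pvH l := by
  induction l generalizing a with
  | nil => simp [pvH]
  | cons c l ih =>
    simp only [List.foldl_cons, List.length_cons, pvH]
    rw [ih, ih ((0 : Int) * 256 + (c.toNat : Int))]
    ring

lemma pvRoll_gen (l : List Char) (a : Int) :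
    l.foldl (fun h c => PySem.Int.mod (h * 256 + (c.toNat : Int)) (2 ^ 64)) (a % 2 ^ 64)
      = (l.foldl (fun h c => h * 256 + (c.toNat : Int)) a) % 2 ^ 64 := by
  induction l generalizing a with
  | nil => simp
  | cons c l ih =>
    simp only [List.foldl_cons]
    rw [PySem.Int.mod_eq_emod_of_pos (by norm_num)]
    have e1 : a % 2 ^ 64 ≡ a [ZMOD (2 ^ 64)] := Int.emod_emod_of_dvd a dvd_rfl
    have h1 : (a % 2 ^ 64 * 256 + (c.toNat : Int)) % 2 ^ 64 = (a * 256 + (c.toNat : Int)) % 2 ^ 64 :=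
      (e1.mul_right 256).add_right _
    rw [h1]
    exact ih (a * 256 + (c.toNat : Int))

lemma pvRollingHash_eq (l : List Char) : pvRollingHash l 256 (2 ^ 64) = pvH l % 2 ^ 64 := by
  have h := pvRoll_gen l 0
  simpa [pvRollingHash, pvH] using h

lemma hashesA_eq (t : List Char) (k : Int) (hk : 0 ≤ k) :
    (PySem.List.pyRange 0 ((t.length : Int) - k + 1) 1).map
        (fun i => pvRollingHash (PySem.List.slice t (some i) (some (i + k))) 256 (2 ^ 64))
      = (List.range (((t.length : Int) - k + 1).toNat)).map (fun j => pvWSpec t k.toNat j) := by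
  rw [PySem.List.pyRange_one, List.map_map,
    show ((t.length : Int) - k + 1 - 0) = ((t.length : Int) - k + 1) from by ring]
  apply List.map_congr_left
  intro j _
  simp only [Function.comp_apply, zero_add]
  rw [pvRollingHash_eq]
  rw [PySem.List.slice_toNat t (by omega) (by omega)]
  rw [show ((j : Nat) : Int).toNat = j from by omega,
      show (((j : Nat) : Int) + k).toNat - j = k.toNat from by omega]
  rfl

-- ---- B-side hashes ----
lemma pvH0_eq (t : List Char) (k : Int) (hk : 0 ≤ k) : pvH0 t k = pvWSpec t k.toNat 0 := by
  unfold pvH0 pvWSpec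
  rw [PySem.List.slice_to t hk, List.drop_zero]
  have h := pvRoll_gen (t.take k.toNat) 0
  simpa [pvH] using h

lemma pvH_shift (t : List Char) (K m : Nat) (hK : 1 ≤ K) (hm : m + 1 + K ≤ t.length) :
    pvH ((t.drop (m + 1)).take K)
      = (pvH ((t.drop m).take K) - ((t.getD m ' ').toNat : Int) * 256 ^ (K - 1)) * 256
        + ((t.getD (m + K) ' ').toNat : Int) := by
  obtain ⟨K', rfl⟩ : ∃ K', K = K' + 1 := ⟨K - 1, by omega⟩
  have hmlen : m < t.length := by omega
  have hlast : m + 1 + K' < t.length := by omega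
  have hgd : t.getD m ' ' = t[m] := List.getD_eq_getElem t ' ' hmlen
  have hgd2 : t.getD (m + (K' + 1)) ' ' = t[m + 1 + K']'hlast := by
    have h : m + (K' + 1) = m + 1 + K' := by omega
    rw [h]
    exact List.getD_eq_getElem t ' ' hlast
  have hdrop : t.drop m = t[m] :: t.drop (m + 1) := List.drop_eq_getElem_cons hmlen
  have hwin1 : (t.drop m).take (K' + 1) = t[m] :: (t.drop (m + 1)).take K' := by
    rw [hdrop, List.take_succ_cons]
  have hwin2 : (t.drop (m + 1)).take (K' + 1)
      = (t.drop (m + 1)).take K' ++ [t[m + 1 + K']'hlast] := by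
    rw [List.take_succ]
    congr 1
    rw [List.getElem?_drop]
    simp [List.getElem?_eq_getElem hlast]
  have hlen' : ((t.drop (m + 1)).take K').length = K' := by
    simp only [List.length_take, List.length_drop]
    omega
  have hH1 : pvH ((t.drop m).take (K' + 1))
      = ((t[m].toNat : Int)) * 256 ^ K' + pvH ((t.drop (m + 1)).take K') := by
    rw [hwin1]
    show List.foldl _ ((0 : Int) * 256 + (t[m].toNat : Int)) _ = _
    rw [pvH_gen, hlen']
    ring
  have hH2 : pvH ((t.drop (m + 1)).take (K' + 1))
      = pvH ((t.drop (m + 1)).take K') * 256 + (((t[m + 1 + K']'hlast).toNat : Int)) := by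
    rw [hwin2]
    unfold pvH
    rw [List.foldl_append]
    rfl
  rw [hH2, hgd, hgd2, hH1]
  simp only [Nat.add_sub_cancel]
  ring

lemma pvKgramStep_spec (t : List Char) (k : Int) (m : Nat) (L : List Int) (hk : 1 ≤ k)
    (hm : (m : Int) + 1 + k ≤ (t.length : Int)) :
    pvKgramStep t k (PySem.Int.powMod 256 (k - 1).toNat (2 ^ 64)) (pvWSpec t k.toNat m, L)
        ((m : Nat) : Int)
      = (pvWSpec t k.toNat (m + 1), L ++ [pvWSpec t k.toNat (m + 1)]) := by
  have hmain : PySem.Int.mod ((pvWSpec t k.toNat m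
        - ((PySem.List.pyGetD t ((m : Nat) : Int) ' ').toNat : Int)
          * PySem.Int.powMod 256 (k - 1).toNat (2 ^ 64)) * 256
      + ((PySem.List.pyGetD t (((m : Nat) : Int) + k) ' ').toNat : Int)) (2 ^ 64)
      = pvWSpec t k.toNat (m + 1) := by
    rw [show ((m : Nat) : Int) + k = ((m + k.toNat : Nat) : Int) from by omega]
    rw [PySem.List.pyGetD_natCast, PySem.List.pyGetD_natCast]
    rw [PySem.Int.powMod_eq_emod 256 (k - 1).toNat (by norm_num)]
    rw [PySem.Int.mod_eq_emod_of_pos (by norm_num)]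
    unfold pvWSpec
    rw [show (k - 1).toNat = k.toNat - 1 from by omega]
    rw [pvH_shift t k.toNat m (by omega) (by omega)]
    have e1 : pvH ((t.drop m).take k.toNat) % 2 ^ 64
        ≡ pvH ((t.drop m).take k.toNat) [ZMOD (2 ^ 64)] := Int.emod_emod_of_dvd _ dvd_rfl
    have e2 : (256 : Int) ^ (k.toNat - 1) % 2 ^ 64
        ≡ (256 : Int) ^ (k.toNat - 1) [ZMOD (2 ^ 64)] := Int.emod_emod_of_dvd _ dvd_rfl
    exact ((e1.sub (e2.mul_left _)).mul_right 256).add_right _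
  simp only [pvKgramStep]
  rw [hmain]

lemma kgram_eq (t : List Char) (k : Int) (hk : 0 ≤ k) (hkl : k ≤ (t.length : Int)) :
    pvKgramHashes t k
      = (List.range (((t.length : Int) - k + 1).toNat)).map (fun j => pvWSpec t k.toNat j) := by
  unfold pvKgramHashes
  by_cases hk0 : k ≤ 0
  · rw [if_pos hk0]
    have hk00 : k = 0 := le_antisymm hk0 hk
    subst hk00
    have hz : ∀ j, pvWSpec t (0 : Int).toNat j = 0 := by
      intro j; simp [pvWSpec, pvH]
    have hmap : (List.range (((t.length : Int) - 0 + 1).toNat)).map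
          (fun j => pvWSpec t (0 : Int).toNat j)
        = (List.range (((t.length : Int) - 0 + 1).toNat)).map (fun _ => (0 : Int)) :=
      List.map_congr_left (fun j _ => hz j)
    rw [hmap, List.map_const', List.length_range]
  · rw [if_neg hk0]
    have hk1 : 1 ≤ k := by omega
    rw [PySem.List.pyRange_one,
      show ((t.length : Int) - k - 0) = ((t.length : Int) - k) from by ring]
    rw [pvH0_eq t k hk]
    have main : ∀ m, m ≤ ((t.length : Int) - k).toNat →
        ((List.range m).map (fun (x : Nat) => (0 : Int) + (x : Int))).foldl
            (pvKgramStep t k (PySem.Int.powMod 256 (k - 1).toNat (2 ^ 64)))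
            (pvWSpec t k.toNat 0, [pvWSpec t k.toNat 0])
          = (pvWSpec t k.toNat m, (List.range (m + 1)).map (fun j => pvWSpec t k.toNat j)) := by
      intro m
      induction m with
      | zero =>
        intro _
        simp [List.range_one]
      | succ m ih =>
        intro hm
        rw [List.range_succ, List.map_append, List.foldl_append, ih (by omega)]
        simp only [List.map_cons, List.map_nil, List.foldl_cons, List.foldl_nil, zero_add]
        rw [pvKgramStep_spec t k m _ hk1 (by omega)]
        rw [show List.range (m + 1 + 1) = List.range (m + 1) ++ [m + 1] from List.range_succ,
          List.map_append]
        rfl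
    have h := main (((t.length : Int) - k).toNat) le_rfl
    rw [h, show (((t.length : Int) - k).toNat) + 1 = ((t.length : Int) - k + 1).toNat from by omega]

-- ---- the sliding-window minimum machinery ----
def pvHGet (hs : List Int) (j : Nat) : Int := hs.getD j 0

def pvPredB (hs : List Int) (i j : Nat) : Bool :=
  (List.range' (j + 1) (i - j)).all (fun j' => decide (pvHGet hs j < pvHGet hs j'))

def pvCand (hs : List Int) (lo i : Nat) : List Nat :=
  (List.range' lo (i + 1 - lo)).filter (fun j => pvPredB hs i j)

def pvDq (hs : List Int) (lo i : Nat) : List (Int × Int) :=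
  (pvCand hs lo i).map (fun j => (pvHGet hs j, (j : Int)))

def pvSelN (hs : List Int) (lo i : Nat) : Nat :=
  (List.range' (lo + 1) (i - lo)).foldl
    (fun best j => if pvHGet hs j ≤ pvHGet hs best then j else best) lo

def pvGN (hs : List Int) (W : Nat) (i : Nat) : Int × Int :=
  (pvHGet hs (pvSelN hs (i + 1 - W) i), ((pvSelN hs (i + 1 - W) i : Nat) : Int))

lemma pvPredB_self (hs : List Int) (i : Nat) : pvPredB hs i i = true := by
  unfold pvPredB
  rw [show i - i = 0 from by omega]
  rfl

lemma pvPredB_spec (hs : List Int) (i j j' : Nat) (h : pvPredB hs i j = true)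
    (h1 : j < j') (h2 : j' ≤ i) : pvHGet hs j < pvHGet hs j' := by
  unfold pvPredB at h
  rw [List.all_eq_true] at h
  have := h j' (by rw [List.mem_range'_1]; omega)
  simpa using this

lemma pvPredB_succ (hs : List Int) (i j : Nat) (hj : j ≤ i) :
    pvPredB hs (i + 1) j = (pvPredB hs i j && decide (pvHGet hs j < pvHGet hs (i + 1))) := by
  unfold pvPredB
  rw [show i + 1 - j = (i - j) + 1 from by omega, List.range'_concat,
    show j + 1 + 1 * (i - j) = i + 1 from by omega, List.all_append]
  simp

lemma mem_pvCand (hs : List Int) (lo i j : Nat) (h : j ∈ pvCand hs lo i) :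
    lo ≤ j ∧ j ≤ i ∧ pvPredB hs i j = true := by
  unfold pvCand at h
  rw [List.mem_filter, List.mem_range'_1] at h
  exact ⟨h.1.1, by omega, h.2⟩

lemma pvCand_self (hs : List Int) (i : Nat) : pvCand hs i i = [i] := by
  unfold pvCand
  rw [show i + 1 - i = 1 from by omega, List.range'_one]
  simp [pvPredB_self]

lemma pvCand_cons (hs : List Int) (lo i : Nat) (hlo : lo ≤ i) :
    pvCand hs lo i
      = if pvPredB hs i lo = true then lo :: pvCand hs (lo + 1) i else pvCand hs (lo + 1) i := by
  unfold pvCand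
  rw [show i + 1 - lo = (i - lo) + 1 from by omega, List.range'_succ, List.filter_cons,
    show i + 1 - (lo + 1) = i - lo from by omega]

lemma pvCand_succ (hs : List Int) (lo i : Nat) (hlo : lo ≤ i + 1) :
    pvCand hs lo (i + 1)
      = (pvCand hs lo i).filter (fun j => decide (pvHGet hs j < pvHGet hs (i + 1))) ++ [i + 1] := by
  by_cases hcase : lo = i + 1
  · rw [hcase, pvCand_self]
    have h0 : pvCand hs (i + 1) i = [] := by
      unfold pvCand
      rw [show i + 1 - (i + 1) = 0 from by omega]
      rfl
    rw [h0]
    rfl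
  · have hlo2 : lo ≤ i := by omega
    unfold pvCand
    rw [show i + 1 + 1 - lo = (i + 1 - lo) + 1 from by omega, List.range'_concat,
      show lo + 1 * (i + 1 - lo) = i + 1 from by omega, List.filter_append]
    congr 1
    · rw [List.filter_filter]
      apply List.filter_congr
      intro j hj
      rw [List.mem_range'_1] at hj
      rw [pvPredB_succ hs i j (by omega)]
      exact Bool.and_comm _ _
    · simp [pvPredB_self]

lemma pvCand_pairwise (hs : List Int) (lo i : Nat) :
    (pvCand hs lo i).Pairwise (fun a b => pvHGet hs a < pvHGet hs b) := by
  have h0 : (List.range' lo (i + 1 - lo)).Pairwise (· < ·) := List.pairwise_lt_range' 1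
  have h1 : (pvCand hs lo i).Pairwise (· < ·) :=
    List.Pairwise.sublist List.filter_sublist h0
  refine List.Pairwise.imp_of_mem ?_ h1
  intro a b ha hb hab
  obtain ⟨_, _, hpa⟩ := mem_pvCand hs lo i a ha
  obtain ⟨_, hbi, _⟩ := mem_pvCand hs lo i b hb
  exact pvPredB_spec hs i a b hpa hab hbi

lemma pvSelN_self (hs : List Int) (lo : Nat) : pvSelN hs lo lo = lo := by
  unfold pvSelN
  rw [show lo - lo = 0 from by omega]
  rfl

lemma pvSelN_succ (hs : List Int) (lo i : Nat) (hlo : lo ≤ i) :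
    pvSelN hs lo (i + 1)
      = if pvHGet hs (i + 1) ≤ pvHGet hs (pvSelN hs lo i) then i + 1 else pvSelN hs lo i := by
  unfold pvSelN
  rw [show i + 1 - lo = (i - lo) + 1 from by omega, List.range'_concat,
    show lo + 1 + 1 * (i - lo) = i + 1 from by omega, List.foldl_append]
  rfl

lemma pvCand_head (hs : List Int) (lo i : Nat) (hlo : lo ≤ i) :
    (pvCand hs lo i).head? = some (pvSelN hs lo i) := by
  induction i with
  | zero =>
    have h0 : lo = 0 := by omega
    subst h0
    rw [pvCand_self, pvSelN_self]
    rfl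
  | succ i ih =>
    by_cases hcase : lo = i + 1
    · subst hcase
      rw [pvCand_self, pvSelN_self]
      rfl
    · have hlo2 : lo ≤ i := by omega
      have hh := ih hlo2
      cases hc : pvCand hs lo i with
      | nil => rw [hc] at hh; simp at hh
      | cons a rest =>
        rw [hc] at hh
        simp only [List.head?_cons, Option.some.injEq] at hh
        subst hh
        rw [pvCand_succ hs lo i (by omega), hc, pvSelN_succ hs lo i hlo2]
        by_cases hlt : pvHGet hs (i + 1) ≤ pvHGet hs (pvSelN hs lo i)
        · rw [if_pos hlt]
          have hfilter : (pvSelN hs lo i :: rest).filter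
              (fun j => decide (pvHGet hs j < pvHGet hs (i + 1))) = [] := by
            rw [List.filter_eq_nil_iff]
            intro j hj
            rcases List.mem_cons.mp hj with rfl | hj'
            · simp only [decide_eq_true_eq]; omega
            · have hpw := pvCand_pairwise hs lo i
              rw [hc, List.pairwise_cons] at hpw
              have := hpw.1 j hj'
              simp only [decide_eq_true_eq]; omega
          rw [hfilter]
          rfl
        · rw [if_neg hlt, List.filter_cons]
          rw [if_pos (by simp only [decide_eq_true_eq]; omega)]
          rfl

lemma pvCand_eq_cons (hs : List Int) (lo i : Nat) (hlo : lo ≤ i) :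
    ∃ rest, pvCand hs lo i = pvSelN hs lo i :: rest := by
  have hh := pvCand_head hs lo i hlo
  cases hc : pvCand hs lo i with
  | nil => rw [hc] at hh; simp at hh
  | cons a rest =>
    rw [hc] at hh
    simp only [List.head?_cons, Option.some.injEq] at hh
    exact ⟨rest, by rw [hh]⟩

lemma pvPopGE_nil (h : Int) : pvPopGE [] h = [] := by
  rw [pvPopGE]
  simp

lemma pvPopGE_concat (l : List (Int × Int)) (a : Int × Int) (h : Int) :
    pvPopGE (l ++ [a]) h = if h ≤ a.1 then pvPopGE l h else l ++ [a] := by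
  rw [pvPopGE]
  have hne : l ++ [a] ≠ [] := by simp
  rw [dif_neg hne]
  simp

lemma pvPopGE_eq_filter (l : List (Int × Int)) (x : Int)
    (hp : l.Pairwise (fun a b => a.1 < b.1)) :
    pvPopGE l x = l.filter (fun p => decide (p.1 < x)) := by
  induction l using List.reverseRecOn with
  | nil => simp [pvPopGE_nil]
  | append_singleton l a ih =>
    rw [pvPopGE_concat, List.filter_append]
    rw [List.pairwise_append] at hp
    by_cases hxa : x ≤ a.1
    · rw [if_pos hxa, ih hp.1]
      simp [show ¬(a.1 < x) from by omega]
    · rw [if_neg hxa]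
      have hall : ∀ p ∈ l, p.1 < x := by
        intro p hpm
        have := hp.2.2 p hpm a (by simp)
        omega
      rw [List.filter_eq_self.mpr (fun p hpm => by simpa using hall p hpm)]
      simp [show a.1 < x from by omega]

lemma loopA_inv (hs : List Int) (W : Nat) (hW : 1 ≤ W) :
    ∀ m, m ≤ hs.length →
      (PySem.List.enumerate (hs.take m)).foldl (pvStepA ((W : Nat) : Int)) ([], [])
        = ((if m = 0 then [] else pvDq hs (m - W) (m - 1)),
           (List.range' (W - 1) (m - (W - 1))).map (pvGN hs W)) := by
  intro m
  induction m with
  | zero =>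
    intro _
    simp [PySem.List.enumerate_nil]
  | succ m ih =>
    intro hm1
    have hmlen : m < hs.length := by omega
    rw [show hs.take (m + 1) = hs.take m ++ [hs[m]] from by
        rw [List.take_succ]; simp [List.getElem?_eq_getElem hmlen],
      PySem.List.enumerate_append, List.foldl_append, ih (by omega),
      show (hs.take m).length = m from by rw [List.length_take]; omega]
    simp only [PySem.List.enumerate_cons, PySem.List.enumerate_nil, List.foldl_cons,
      List.foldl_nil, zero_add]
    have hgetm : hs[m] = pvHGet hs m := (List.getD_eq_getElem hs 0 hmlen).symm
    have hC1 : pvPopGE (if m = 0 then [] else pvDq hs (m - W) (m - 1)) hs[m]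
        ++ [(hs[m], ((m : Nat) : Int))] = pvDq hs (m - W) m := by
      by_cases hm0 : m = 0
      · subst hm0
        rw [if_pos rfl, pvPopGE_nil, show (0 : Nat) - W = 0 from by omega]
        unfold pvDq
        rw [pvCand_self]
        simp [hgetm]
      · obtain ⟨m', rfl⟩ : ∃ m', m = m' + 1 := ⟨m - 1, by omega⟩
        rw [if_neg (by omega), show m' + 1 - 1 = m' from by omega]
        have hpw : (pvDq hs (m' + 1 - W) m').Pairwise (fun a b => a.1 < b.1) := by
          unfold pvDq
          rw [List.pairwise_map]
          exact pvCand_pairwise hs _ m'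
        rw [pvPopGE_eq_filter _ _ hpw]
        unfold pvDq
        rw [List.filter_map]
        have hfc : ((fun (p : Int × Int) => decide (p.1 < hs[m' + 1]))
              ∘ (fun j => (pvHGet hs j, (j : Int))))
            = fun j => decide (pvHGet hs j < pvHGet hs (m' + 1)) := by
          funext j
          simp [Function.comp, hgetm]
        rw [hfc, pvCand_succ hs (m' + 1 - W) m' (by omega), List.map_append]
        simp [hgetm]
    have hdq2 : pvStepDq ((W : Nat) : Int) (if m = 0 then [] else pvDq hs (m - W) (m - 1))
        (((m : Nat) : Int), hs[m]) = pvDq hs (m + 1 - W) m := by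
      unfold pvStepDq
      simp only []
      rw [hC1]
      by_cases hmW : m < W
      · rw [if_neg (by rintro ⟨h1, -⟩; omega), show m + 1 - W = m - W from by omega]
      · have hWm : W ≤ m := by omega
        by_cases hpred : pvPredB hs m (m - W) = true
        · have hcons : pvCand hs (m - W) m = (m - W) :: pvCand hs (m - W + 1) m := by
            rw [pvCand_cons hs (m - W) m (by omega), if_pos hpred]
          unfold pvDq
          rw [hcons, List.map_cons]
          rw [if_pos ⟨by omega, by show ((m - W : Nat) : Int) ≤ (m : Nat) - (W : Nat); omega⟩]
          rw [List.tail_cons, show m + 1 - W = m - W + 1 from by omega]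
        · have htail : pvCand hs (m - W) m = pvCand hs (m - W + 1) m := by
            rw [pvCand_cons hs (m - W) m (by omega), if_neg hpred]
          unfold pvDq
          rw [htail]
          obtain ⟨rest, hrest⟩ := pvCand_eq_cons hs (m - W + 1) m (by omega)
          have hsel_lb : m - W + 1 ≤ pvSelN hs (m - W + 1) m := by
            have hmem : pvSelN hs (m - W + 1) m ∈ pvCand hs (m - W + 1) m := by
              rw [hrest]; simp
            exact (mem_pvCand hs _ m _ hmem).1
          have hhd : ((pvCand hs (m - W + 1) m).map (fun j => (pvHGet hs j, (j : Int)))).headD (0, 0)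
              = (pvHGet hs (pvSelN hs (m - W + 1) m), ((pvSelN hs (m - W + 1) m : Nat) : Int)) := by
            rw [hrest]; rfl
          rw [if_neg (by
            rintro ⟨-, h2⟩
            rw [hhd] at h2
            simp only [] at h2
            omega)]
          rw [show m + 1 - W = m - W + 1 from by omega]
    rw [if_neg (by omega : ¬ m + 1 = 0), show m + 1 - 1 = m from by omega]
    simp only [pvStepA, Prod.mk.injEq]
    constructor
    · exact hdq2
    · rw [hdq2]
      by_cases hem : W ≤ m + 1
      · rw [if_pos (by omega)]
        obtain ⟨rest, hrest⟩ := pvCand_eq_cons hs (m + 1 - W) m (by omega)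
        have hhd : (pvDq hs (m + 1 - W) m).headD (0, 0)
            = (pvHGet hs (pvSelN hs (m + 1 - W) m), ((pvSelN hs (m + 1 - W) m : Nat) : Int)) := by
          unfold pvDq
          rw [hrest]; rfl
        rw [hhd, show m + 1 - (W - 1) = (m - (W - 1)) + 1 from by omega, List.range'_concat,
          show W - 1 + 1 * (m - (W - 1)) = m from by omega, List.map_append]
        rfl
      · rw [if_neg (by omega)]
        rw [show m + 1 - (W - 1) = 0 from by omega, show m - (W - 1) = 0 from by omega]

def pvIsRArg (hs : List Int) (lo i b : Nat) : Prop :=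
  lo ≤ b ∧ b ≤ i ∧ (∀ j, lo ≤ j → j ≤ i → pvHGet hs b ≤ pvHGet hs j) ∧
    (∀ j, b < j → j ≤ i → pvHGet hs b < pvHGet hs j)

lemma pvSelN_rarg (hs : List Int) (lo i : Nat) (h : lo ≤ i) :
    pvIsRArg hs lo i (pvSelN hs lo i) := by
  induction i, h using Nat.le_induction with
  | base =>
    rw [pvSelN_self]
    refine ⟨le_rfl, le_rfl, ?_, ?_⟩
    · intro j h1 h2
      have : j = lo := by omega
      subst this
      exact le_rfl
    · intro j h1 h2
      omega
  | succ i hi ih =>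
    obtain ⟨h1, h2, h3, h4⟩ := ih
    rw [pvSelN_succ hs lo i hi]
    split_ifs with hcmp
    · refine ⟨by omega, le_rfl, ?_, ?_⟩
      · intro j hj1 hj2
        rcases Nat.lt_or_ge j (i + 1) with hj | hj
        · exact hcmp.trans (h3 j hj1 (by omega))
        · have : j = i + 1 := by omega
          subst this
          exact le_rfl
      · intro j hj1 hj2
        omega
    · refine ⟨h1, by omega, ?_, ?_⟩
      · intro j hj1 hj2
        rcases Nat.lt_or_ge j (i + 1) with hj | hj
        · exact h3 j hj1 (by omega)
        · have : j = i + 1 := by omega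
          subst this
          omega
      · intro j hj1 hj2
        rcases Nat.lt_or_ge j (i + 1) with hj | hj
        · exact h4 j hj1 (by omega)
        · have : j = i + 1 := by omega
          subst this
          omega

lemma pvSelN_window_mono (hs : List Int) (lo i : Nat) (h : lo ≤ i) :
    pvSelN hs lo i ≤ pvSelN hs (lo + 1) (i + 1) := by
  rcases le_or_gt (pvSelN hs lo i) (pvSelN hs (lo + 1) (i + 1)) with hle | hgt
  · exact hle
  exfalso
  obtain ⟨hb1, hb2, hb3, hb4⟩ := pvSelN_rarg hs lo i h
  obtain ⟨hc1, hc2, hc3, hc4⟩ := pvSelN_rarg hs (lo + 1) (i + 1) (by omega)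
  have hineq1 : pvHGet hs (pvSelN hs lo i) ≤ pvHGet hs (pvSelN hs (lo + 1) (i + 1)) :=
    hb3 _ (by omega) (by omega)
  have hineq2 : pvHGet hs (pvSelN hs (lo + 1) (i + 1)) < pvHGet hs (pvSelN hs lo i) :=
    hc4 _ (by omega) (by omega)
  omega

lemma pvRArg_eq_selN (hs : List Int) (l i b : Nat) (hli : l ≤ i)
    (hb : pvIsRArg hs l i b) : b = pvSelN hs l i := by
  obtain ⟨b1, b2, b3, b4⟩ := hb
  obtain ⟨c1, c2, c3, c4⟩ := pvSelN_rarg hs l i hli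
  rcases lt_trichotomy b (pvSelN hs l i) with h | h | h
  · have h1 := b4 _ h c2
    have h2 := c3 _ b1 b2
    omega
  · exact h
  · have h1 := c4 _ h b2
    have h2 := b3 _ c1 c2
    omega

lemma pvSelN_down (hs : List Int) (i be : Nat) (h : i < be) :
    pvSelN hs i be
      = if pvHGet hs i < pvHGet hs (pvSelN hs (i + 1) be) then i else pvSelN hs (i + 1) be := by
  symm
  apply pvRArg_eq_selN hs i be _ (by omega)
  obtain ⟨c1, c2, c3, c4⟩ := pvSelN_rarg hs (i + 1) be (by omega)
  split_ifs with hcmp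
  · refine ⟨le_rfl, by omega, ?_, ?_⟩
    · intro j hj1 hj2
      rcases Nat.eq_or_lt_of_le hj1 with rfl | hj
      · exact le_rfl
      · have := c3 j (by omega) hj2
        omega
    · intro j hj1 hj2
      have := c3 j (by omega) hj2
      omega
  · refine ⟨by omega, c2, ?_, ?_⟩
    · intro j hj1 hj2
      rcases Nat.eq_or_lt_of_le hj1 with rfl | hj
      · omega
      · exact c3 j (by omega) hj2
    · intro j hj1 hj2
      exact c4 j (by omega) hj2

lemma pvSelN_combine (hs : List Int) (l m i : Nat) (hlm : l ≤ m) (hmi : m < i) :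
    pvSelN hs l i
      = if pvHGet hs (pvSelN hs (m + 1) i) ≤ pvHGet hs (pvSelN hs l m) then pvSelN hs (m + 1) i
        else pvSelN hs l m := by
  symm
  apply pvRArg_eq_selN hs l i _ (by omega)
  obtain ⟨a1, a2, a3, a4⟩ := pvSelN_rarg hs l m hlm
  obtain ⟨c1, c2, c3, c4⟩ := pvSelN_rarg hs (m + 1) i (by omega)
  split_ifs with hcmp
  · refine ⟨by omega, c2, ?_, ?_⟩
    · intro j hj1 hj2
      rcases Nat.lt_or_ge j (m + 1) with hj | hj
      · have := a3 j hj1 (by omega)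
        omega
      · exact c3 j (by omega) hj2
    · intro j hj1 hj2
      exact c4 j hj1 hj2
  · refine ⟨a1, by omega, ?_, ?_⟩
    · intro j hj1 hj2
      rcases Nat.lt_or_ge j (m + 1) with hj | hj
      · exact a3 j hj1 (by omega)
      · have := c3 j (by omega) hj2
        omega
    · intro j hj1 hj2
      rcases Nat.lt_or_ge j (m + 1) with hj | hj
      · exact a4 j hj1 (by omega)
      · have := c3 j (by omega) hj2
        omega

-- Nat-level specifications of B's block prefix/suffix minima
def pvPrefN (hs : List Int) (W i : Nat) : Nat := pvSelN hs (i - i % W) i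

def pvBe (W n i : Nat) : Nat := min (i - i % W + W - 1) (n - 1)

def pvSufN (hs : List Int) (W n i : Nat) : Nat := pvSelN hs i (pvBe W n i)

lemma pvMod_succ_ne_zero (m W : Nat) (hW : 1 ≤ W) (h : ¬ (m + 1) % W = 0) :
    (m + 1) % W = m % W + 1 := by
  have hq := Nat.div_add_mod m W
  have hmlt : m % W < W := Nat.mod_lt _ (by omega)
  rcases Nat.eq_or_lt_of_le (show m % W + 1 ≤ W from by omega) with heq | hlt
  · exfalso
    apply h
    have he : m + 1 = W * (m / W + 1) := by
      have hmul : W * (m / W + 1) = W * (m / W) + W := by ring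
      omega
    rw [he]
    exact Nat.mul_mod_right _ _
  · have he : m + 1 = (m % W + 1) + W * (m / W) := by omega
    rw [he, Nat.add_mul_mod_self_left, Nat.mod_eq_of_lt hlt]

lemma pvPrefN_succ (hs : List Int) (W m : Nat) (hW : 1 ≤ W) (h : ¬ (m + 1) % W = 0) :
    pvPrefN hs W (m + 1)
      = if pvHGet hs (m + 1) ≤ pvHGet hs (pvPrefN hs W m) then m + 1 else pvPrefN hs W m := by
  have h1 := pvMod_succ_ne_zero m W hW h
  have hbs : (m + 1) - (m + 1) % W = m - m % W := by omega
  unfold pvPrefN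
  rw [hbs, pvSelN_succ hs _ m (by have := Nat.mod_le m W; omega)]

lemma pvPrefList_eq (hs : List Int) (w : Int) (W : Nat) (hw : w = (W : Int)) (hW : 1 ≤ W) :
    pvPrefList hs w = (List.range hs.length).map (fun i => ((pvPrefN hs W i : Nat) : Int)) := by
  subst hw
  unfold pvPrefList
  rw [PySem.List.pyRange_one,
    show ((hs.length : Int) - 0) = ((hs.length : Int)) from by ring, Int.toNat_natCast]
  have main : ∀ m, m ≤ hs.length →
      ((List.range m).map (fun (k : Nat) => (0 : Int) + (k : Int))).foldl
          (fun pr i =>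
            pr ++ [if PySem.Int.mod i ((W : Nat) : Int) = 0 ∨
                     PySem.List.pyGetD hs i 0
                       ≤ PySem.List.pyGetD hs (PySem.List.pyGetD pr (i - 1) 0) 0
                   then i else PySem.List.pyGetD pr (i - 1) 0]) []
        = (List.range m).map (fun i => ((pvPrefN hs W i : Nat) : Int)) := by
    intro m
    induction m with
    | zero => intro _; rfl
    | succ m ih =>
      intro hm
      rw [List.range_succ, List.map_append, List.foldl_append, ih (by omega)]
      simp only [List.map_cons, List.map_nil, List.foldl_cons, List.foldl_nil, zero_add]
      rw [List.map_append]
      congr 1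
      simp only [List.map_cons, List.map_nil]
      have hmodc : PySem.Int.mod ((m : Nat) : Int) ((W : Nat) : Int) = ((m % W : Nat) : Int) :=
        PySem.Int.mod_natCast m W
      by_cases hm0 : m % W = 0
      · rw [if_pos (Or.inl (by rw [hmodc, hm0]; rfl))]
        unfold pvPrefN
        rw [hm0, Nat.sub_zero, pvSelN_self]
      · obtain ⟨m', rfl⟩ : ∃ m', m = m' + 1 := ⟨m - 1, by
          rcases Nat.eq_zero_or_pos m with rfl | hpos
          · exact absurd (Nat.zero_mod W) hm0
          · omega⟩
        have hprev : PySem.List.pyGetD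
              ((List.range (m' + 1)).map (fun i => ((pvPrefN hs W i : Nat) : Int)))
              (((m' + 1 : Nat) : Int) - 1) 0 = ((pvPrefN hs W m' : Nat) : Int) := by
          rw [show ((m' + 1 : Nat) : Int) - 1 = ((m' : Nat) : Int) from by omega,
            PySem.List.pyGetD_natCast, List.range_succ, List.map_append,
            List.getD_eq_getElem _ _ (by simp)]
          simp
        rw [hprev]
        have hrec := pvPrefN_succ hs W m' hW hm0
        have hcond : ¬ (PySem.Int.mod ((m' + 1 : Nat) : Int) ((W : Nat) : Int) = 0) := by
          rw [PySem.Int.mod_natCast]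
          intro hcon
          exact hm0 (by exact_mod_cast hcon)
        by_cases hle : pvHGet hs (m' + 1) ≤ pvHGet hs (pvPrefN hs W m')
        · rw [if_pos (Or.inr (by
            rw [PySem.List.pyGetD_natCast, PySem.List.pyGetD_natCast]
            exact hle))]
          rw [hrec, if_pos hle]
        · rw [if_neg (by
            rintro (hc | hc)
            · exact hcond hc
            · rw [PySem.List.pyGetD_natCast, PySem.List.pyGetD_natCast] at hc
              exact hle hc)]
          rw [hrec, if_neg hle]
  exact main hs.length le_rfl

lemma pvBe_self_of_block_end (W n i : Nat) (hW : 1 ≤ W) (hin : i < n)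
    (h : i % W = W - 1 ∨ i = n - 1) : pvBe W n i = i := by
  have hle := Nat.mod_le i W
  have hlt := Nat.mod_lt i (show 0 < W from by omega)
  rcases h with h | h
  · unfold pvBe
    omega
  · unfold pvBe
    omega

lemma pvBe_succ (W n i : Nat) (hW : 1 ≤ W) (hin : i + 1 < n) (h : ¬ i % W = W - 1) :
    pvBe W n i = pvBe W n (i + 1) := by
  have hlt := Nat.mod_lt i (show 0 < W from by omega)
  have h1 : (i + 1) % W = i % W + 1 := by
    have he : i + 1 = (i % W + 1) + W * (i / W) := by
      have := Nat.div_add_mod i W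
      omega
    rw [he, Nat.add_mul_mod_self_left, Nat.mod_eq_of_lt (by omega)]
  unfold pvBe
  omega

lemma pvSufN_succ (hs : List Int) (W n i : Nat) (hW : 1 ≤ W) (hin : i + 1 < n)
    (h : ¬ i % W = W - 1) :
    pvSufN hs W n i
      = if pvHGet hs i < pvHGet hs (pvSufN hs W n (i + 1)) then i
        else pvSufN hs W n (i + 1) := by
  unfold pvSufN
  rw [pvBe_succ W n i hW hin h]
  apply pvSelN_down
  have hlt := Nat.mod_lt (i + 1) (show 0 < W from by omega)
  have hle := Nat.mod_le (i + 1) W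
  unfold pvBe
  omega

lemma pvRsufList_eq (hs : List Int) (w : Int) (W : Nat) (hw : w = (W : Int)) (hW : 1 ≤ W) :
    pvRsufList hs w
      = (List.range hs.length).map
          (fun j => ((pvSufN hs W hs.length (hs.length - 1 - j) : Nat) : Int)) := by
  subst hw
  unfold pvRsufList
  rw [PySem.List.pyRange_neg_one,
    show ((hs.length : Int) - 1 - (-1)) = ((hs.length : Int)) from by ring, Int.toNat_natCast]
  set n := hs.length with hn
  have main : ∀ m, m ≤ n →
      ((List.range m).map (fun (k : Nat) => ((n : Int) - 1) - (k : Int))).foldl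
          (fun rs i =>
            rs ++ [if i = ((n : Nat) : Int) - 1 ∨
                     PySem.Int.mod i ((W : Nat) : Int) = ((W : Nat) : Int) - 1 ∨
                     PySem.List.pyGetD hs i 0
                       < PySem.List.pyGetD hs (PySem.List.pyGetD rs (-1) 0) 0
                   then i else PySem.List.pyGetD rs (-1) 0]) []
        = (List.range m).map (fun j => ((pvSufN hs W n (n - 1 - j) : Nat) : Int)) := by
    intro m
    induction m with
    | zero => intro _; rfl
    | succ m ih =>
      intro hm
      rw [List.range_succ, List.map_append, List.foldl_append, ih (by omega)]
      simp only [List.map_cons, List.map_nil, List.foldl_cons, List.foldl_nil]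
      rw [List.map_append]
      congr 1
      simp only [List.map_cons, List.map_nil]
      have hmn : m < n := by omega
      have hiv : ((n : Int) - 1) - (m : Int) = (((n - 1 - m : Nat)) : Int) := by omega
      set i := n - 1 - m with hidef
      have hsufi' : i < n := by omega
      by_cases hend : i % W = W - 1 ∨ i = n - 1
      · have hbe := pvBe_self_of_block_end W n i hW hsufi' hend
        have hval : pvSufN hs W n i = i := by
          unfold pvSufN
          rw [hbe, pvSelN_self]
        rw [hiv, if_pos ?_, hval]
        rcases hend with hmod | hlast
        · right; left
          rw [PySem.Int.mod_natCast, hmod]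
          omega
        · left
          rw [hlast]
          omega
      · push_neg at hend
        obtain ⟨hmod, hlast⟩ := hend
        have hm1 : 1 ≤ m := by
          by_contra hc
          have : m = 0 := by omega
          subst this
          exact hlast (by omega)
        have hprev : PySem.List.pyGetD
              ((List.range m).map (fun j => ((pvSufN hs W n (n - 1 - j) : Nat) : Int))) (-1) 0
            = ((pvSufN hs W n (i + 1) : Nat) : Int) := by
          have hsplit : List.range m = List.range (m - 1) ++ [m - 1] := by
            conv_lhs => rw [show m = (m - 1) + 1 from by omega]
            exact List.range_succ
          rw [hsplit, List.map_append]
          simp only [List.map_cons, List.map_nil]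
          rw [PySem.List.pyGetD_neg_one_append_singleton]
          congr 2
          omega
        have hrec := pvSufN_succ hs W n i hW (by omega) hmod
        rw [hprev, hiv]
        have hcond1 : ¬ (((i : Nat) : Int) = ((n : Nat) : Int) - 1) := by omega
        have hcond2 : ¬ (PySem.Int.mod ((i : Nat) : Int) ((W : Nat) : Int)
            = ((W : Nat) : Int) - 1) := by
          rw [PySem.Int.mod_natCast]
          intro hc
          apply hmod
          have hlt := Nat.mod_lt i (show 0 < W from by omega)
          omega
        by_cases hlt : pvHGet hs i < pvHGet hs (pvSufN hs W n (i + 1))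
        · rw [if_pos (Or.inr (Or.inr (by
            rw [PySem.List.pyGetD_natCast, PySem.List.pyGetD_natCast]
            exact hlt)))]
          rw [hrec, if_pos hlt]
        · rw [if_neg (by
            rintro (hc | hc | hc)
            · exact hcond1 hc
            · exact hcond2 hc
            · rw [PySem.List.pyGetD_natCast, PySem.List.pyGetD_natCast] at hc
              exact hlt hc)]
          rw [hrec, if_neg hlt]
  exact main n le_rfl

lemma pvSufList_reverse_eq (hs : List Int) (w : Int) (W : Nat) (hw : w = (W : Int))
    (hW : 1 ≤ W) :
    (pvRsufList hs w).reverse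
      = (List.range hs.length).map (fun i => ((pvSufN hs W hs.length i : Nat) : Int)) := by
  rw [pvRsufList_eq hs w W hw hW]
  apply List.ext_getElem
  · simp
  · intro j h1 h2
    simp only [List.length_reverse, List.length_map, List.length_range] at h1 h2
    rw [List.getElem_reverse]
    simp only [List.getElem_map, List.getElem_range, List.length_map, List.length_range]
    congr 2
    omega

lemma pvCombineVal (hs : List Int) (W i : Nat) (hW : 1 ≤ W) (hWi : W - 1 ≤ i)
    (hin : i < hs.length) :
    (if pvHGet hs (pvPrefN hs W i) ≤ pvHGet hs (pvSufN hs W hs.length (i + 1 - W))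
      then pvPrefN hs W i else pvSufN hs W hs.length (i + 1 - W))
      = pvSelN hs (i + 1 - W) i := by
  set n := hs.length with hn
  set l := i + 1 - W with hl
  have hli : l ≤ i := by omega
  have hiW : i = l + W - 1 := by omega
  have hlmod := Nat.mod_lt l (show 0 < W from by omega)
  by_cases hl0 : l % W = 0
  · -- window = one whole block: pref and suf both cover [l, i]
    have hblock : i % W = W - 1 := by
      obtain ⟨q, hq⟩ := Nat.dvd_of_mod_eq_zero hl0
      have he : i = (W - 1) + W * q := by omega
      rw [he, Nat.add_mul_mod_self_left, Nat.mod_eq_of_lt (by omega)]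
    have hpref : pvPrefN hs W i = pvSelN hs l i := by
      unfold pvPrefN
      rw [hblock]
      congr 1
      omega
    have hsuf : pvSufN hs W n l = pvSelN hs l i := by
      unfold pvSufN pvBe
      congr 1
      omega
    rw [hpref, hsuf]
    split_ifs <;> rfl
  · -- window spans two blocks, cut at m = end of l's block
    have hr1 : 1 ≤ l % W := by omega
    set m := l - l % W + W - 1 with hm
    have hmook : l ≤ m ∧ m < i := by
      have := Nat.mod_le l W
      omega
    have himod : i % W = l % W - 1 := by
      have he : i = (l % W - 1) + W * (l / W + 1) := by
        have hq2 := Nat.div_add_mod l W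
        have hmul : W * (l / W + 1) = W * (l / W) + W := by ring
        omega
      rw [he, Nat.add_mul_mod_self_left, Nat.mod_eq_of_lt (by omega)]
    have hpref : pvPrefN hs W i = pvSelN hs (m + 1) i := by
      unfold pvPrefN
      congr 1
      have := Nat.mod_le l W
      omega
    have hsuf : pvSufN hs W n l = pvSelN hs l m := by
      unfold pvSufN pvBe
      congr 1
      have h1 : l - l % W + W - 1 ≤ n - 1 := by
        have := Nat.mod_le l W
        omega
      omega
    rw [hpref, hsuf, pvSelN_combine hs l m i hmook.1 hmook.2]

lemma argmins_pairs (hs : List Int) (w : Int) (W : Nat) (hw : w = (W : Int)) (hW : 1 ≤ W) :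
    (pvArgmins hs w).map (fun b => (PySem.List.pyGetD hs b 0, b))
      = (List.range' (W - 1) (hs.length - (W - 1))).map (pvGN hs W) := by
  unfold pvArgmins pvCombine
  rw [pvPrefList_eq hs w W hw hW, pvSufList_reverse_eq hs w W hw hW]
  subst hw
  set n := hs.length with hn
  rw [PySem.List.pyRange_one, List.map_map, List.map_map,
    show (((n : Nat) : Int) - (((W : Nat) : Int) - 1)).toNat = n - (W - 1) from by omega,
    List.range'_eq_map_range, List.map_map]
  apply List.map_congr_left
  intro x hx
  rw [List.mem_range] at hx
  simp only [Function.comp_apply]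
  set i := W - 1 + x with hi
  have hiv : ((W : Nat) : Int) - 1 + (x : Int) = ((i : Nat) : Int) := by omega
  have hin : i < n := by omega
  have hlv : ((i : Nat) : Int) - ((W : Nat) : Int) + 1 = (((i + 1 - W : Nat)) : Int) := by omega
  have hgp : PySem.List.pyGetD
        ((List.range n).map (fun i => ((pvPrefN hs W i : Nat) : Int))) ((i : Nat) : Int) 0
      = ((pvPrefN hs W i : Nat) : Int) := by
    rw [PySem.List.pyGetD_natCast, List.getD_eq_getElem _ _ (by simpa using hin)]
    simp
  have hgs : PySem.List.pyGetD
        ((List.range n).map (fun i => ((pvSufN hs W n i : Nat) : Int)))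
        ((((i + 1 - W : Nat)) : Int)) 0
      = ((pvSufN hs W n (i + 1 - W) : Nat) : Int) := by
    rw [PySem.List.pyGetD_natCast, List.getD_eq_getElem _ _ (by simp; omega)]
    simp
  rw [hiv, hlv, hgp, hgs, PySem.List.pyGetD_natCast, PySem.List.pyGetD_natCast]
  have hcv := pvCombineVal hs W i hW (by omega) hin
  unfold pvGN
  by_cases hc : pvHGet hs (pvPrefN hs W i) ≤ pvHGet hs (pvSufN hs W hs.length (i + 1 - W))
  · rw [if_pos (by exact hc)]
    rw [if_pos hc] at hcv
    rw [hcv, PySem.List.pyGetD_natCast]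
    rfl
  · rw [if_neg (by exact hc)]
    rw [if_neg hc] at hcv
    rw [hcv, PySem.List.pyGetD_natCast]
    rfl

lemma dedupe_loop_eq (hs : List Int) (w : Int) (hw : 1 ≤ w) :
    pvDedupe (((PySem.List.enumerate hs).foldl (pvStepA w) ([], [])).2) = pvFpLoop hs w := by
  have hwW : w = ((w.toNat : Nat) : Int) := by omega
  have h := loopA_inv hs w.toNat (by omega) hs.length le_rfl
  rw [List.take_length] at h
  rw [hwW, h]
  unfold pvFpLoop pvDedupe
  rw [← argmins_pairs hs w w.toNat hwW (by omega), ← hwW, List.foldl_map]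


lemma winnow_eq (t : List Char) (k w : Int) (hk : 0 ≤ k) (hw : 1 ≤ w) :
    pvWinnow t k w = pvFingerprints t k w := by
  unfold pvWinnow pvFingerprints
  by_cases hlt : (t.length : Int) < k
  · rw [if_pos hlt, if_pos hlt]
  · rw [if_neg hlt, if_neg hlt]
    rw [hashesA_eq t k hk, ← kgram_eq t k hk (by omega)]
    exact dedupe_loop_eq _ w hw

-- ---- distinctness of fingerprint positions (justifies B dropping A's seen-set) ----
lemma pvGN_rel (hs : List Int) (W m : Nat) (hW : 1 ≤ W) (hm : W - 1 ≤ m) :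
    pvGN hs W m = pvGN hs W (m + 1) ∨ (pvGN hs W m).2 < (pvGN hs W (m + 1)).2 := by
  have hlo : m + 1 - W ≤ m := by omega
  have hmono := pvSelN_window_mono hs (m + 1 - W) m hlo
  have he : m + 1 - W + 1 = m + 1 + 1 - W := by omega
  rw [he] at hmono
  rcases Nat.eq_or_lt_of_le hmono with heq | hlt
  · left
    unfold pvGN
    rw [heq]
  · right
    unfold pvGN
    simp only []
    exact_mod_cast hlt

lemma pvIsChain_range' (R : Nat → Nat → Prop) (s n : Nat) (h : ∀ m, s ≤ m → R m (m + 1)) :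
    List.IsChain R (List.range' s n) := by
  induction n generalizing s with
  | zero => exact List.isChain_nil
  | succ n ih =>
    rw [List.range'_succ]
    apply List.isChain_cons.mpr
    refine ⟨?_, ih (s + 1) (fun m hm => h m (by omega))⟩
    intro b hb
    cases n with
    | zero => simp at hb
    | succ n =>
      rw [List.range'_succ] at hb
      simp only [List.head?_cons, Option.mem_def, Option.some.injEq] at hb
      subst hb
      exact h s le_rfl

lemma pvDedupe_aux (L : List (Int × Int)) (p : Int × Int) (acc : List (Int × Int))
    (hch : List.IsChain (fun a b => a = b ∨ a.2 < b.2) (p :: L))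
    (hacc : acc.Pairwise (fun a b => a.2 < b.2))
    (hle : ∀ a ∈ acc, a.2 ≤ p.2) :
    ((L.foldl (fun (st : List (Int × Int) × Option (Int × Int)) f =>
        (if st.2 ≠ some f then st.1 ++ [f] else st.1, some f)) (acc, some p)).1).Pairwise
      (fun a b => a.2 < b.2) := by
  induction L generalizing p acc with
  | nil => simpa
  | cons f L ih =>
    rw [List.isChain_cons_cons] at hch
    obtain ⟨hpf, hch'⟩ := hch
    simp only [List.foldl_cons]
    rcases hpf with heq | hlt
    · subst heq
      rw [show (if (acc, some p).2 ≠ some p then (acc, some p).1 ++ [p] else (acc, some p).1,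
            some p) = (acc, some p) from by simp]
      exact ih p acc hch' hacc hle
    · have hne : (acc, some p).2 ≠ some f := by
        simp only [ne_eq, Option.some.injEq]
        intro hc
        rw [hc] at hlt
        exact absurd hlt (lt_irrefl _)
      rw [if_pos hne]
      apply ih f (acc ++ [f]) hch'
      · rw [List.pairwise_append]
        refine ⟨hacc, List.pairwise_singleton _ _, ?_⟩
        intro a ha b hb
        rw [List.mem_singleton] at hb
        subst hb
        exact lt_of_le_of_lt (hle a ha) hlt
      · intro a ha
        rcases List.mem_append.mp ha with ha' | ha'
        · exact le_of_lt (lt_of_le_of_lt (hle a ha') hlt)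
        · rw [List.mem_singleton] at ha'
          subst ha'
          exact le_rfl

lemma pvDedupe_pairwise (L : List (Int × Int))
    (hch : List.IsChain (fun a b => a = b ∨ a.2 < b.2) L) :
    (pvDedupe L).Pairwise (fun a b => a.2 < b.2) := by
  cases L with
  | nil => simp [pvDedupe]
  | cons a L =>
    unfold pvDedupe
    simp only [List.foldl_cons]
    rw [show (if (([] : List (Int × Int)), (none : Option (Int × Int))).2 ≠ some a
          then (([] : List (Int × Int)), (none : Option (Int × Int))).1 ++ [a]
          else (([] : List (Int × Int)), (none : Option (Int × Int))).1, some a)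
        = ([a], some a) from by simp]
    exact pvDedupe_aux L a [a] hch (List.pairwise_singleton _ _)
      (fun b hb => by rw [List.mem_singleton] at hb; subst hb; exact le_rfl)

lemma pvWinnow_pairwise (t : List Char) (k w : Int) (hw : 1 ≤ w) :
    (pvWinnow t k w).Pairwise (fun a b => a.2 < b.2) := by
  unfold pvWinnow
  split_ifs with hlt
  · exact List.Pairwise.nil
  · set hs := (PySem.List.pyRange 0 ((t.length : Int) - k + 1) 1).map
      (fun i => pvRollingHash (PySem.List.slice t (some i) (some (i + k))) 256 (2 ^ 64)) with hhs
    have hW1 : 1 ≤ w.toNat := by omega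
    have hwW : w = ((w.toNat : Nat) : Int) := by omega
    have h := loopA_inv hs w.toNat hW1 hs.length le_rfl
    rw [List.take_length] at h
    rw [hwW, h]
    apply pvDedupe_pairwise
    rw [List.isChain_map]
    exact pvIsChain_range' _ _ _ (fun m hm => pvGN_rel hs w.toNat m hW1 hm)

lemma pvWinnow_snd_nodup (t : List Char) (k w : Int) (hw : 1 ≤ w) :
    ((pvWinnow t k w).map Prod.snd).Nodup := by
  have h := pvWinnow_pairwise t k w hw
  have h2 : ((pvWinnow t k w).map Prod.snd).Pairwise (· < ·) := List.pairwise_map.mpr h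
  exact h2.imp (fun hab => ne_of_lt hab)

lemma pvSrcIndex_getD (src : List Char) (k w h : Int) :
    (pvSrcIndex src k w).getD h []
      = ((pvFingerprints src k w).filter (fun q => q.1 == h)).map (·.2) := by
  unfold pvSrcIndex
  rw [PySem.Dict.getD_foldl_modify_append]
  rfl

lemma pvSrcIndex_getD_nodup (src : List Char) (k w : Int) (hk : 0 ≤ k) (hw : 1 ≤ w) (h : Int) :
    ((pvSrcIndex src k w).getD h []).Nodup := by
  rw [pvSrcIndex_getD, ← winnow_eq src k w hk hw]
  have hpw : ((pvWinnow src k w).filter (fun q => q.1 == h)).Pairwise (fun a b => a.2 < b.2) :=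
    List.Pairwise.sublist List.filter_sublist (pvWinnow_pairwise src k w hw)
  have h2 : (((pvWinnow src k w).filter (fun q => q.1 == h)).map (·.2)).Pairwise (· < ·) :=
    List.pairwise_map.mpr hpw
  exact h2.imp (fun hab => ne_of_lt hab)

-- ---- A's seen-set fold collapses to B's flat map when no key can repeat ----
lemma pvInnerFold (k sp : Int) (xs : List Int) (acc : List (Int × Int × Int))
    (s : PySem.Set (Int × Int)) (hnd : xs.Nodup) (hfresh : ∀ x ∈ xs, (sp, x) ∉ s) :
    xs.foldl (fun (st2 : List (Int × Int × Int) × PySem.Set (Int × Int)) xpos =>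
        if (sp, xpos) ∉ st2.2 then (st2.1 ++ [(sp, k, xpos)], PySem.Set.add st2.2 (sp, xpos))
        else st2) (acc, s)
      = (acc ++ xs.map (fun x => (sp, k, x)),
         PySem.Set.update s (xs.map (fun x => (sp, x)))) := by
  induction xs generalizing acc s with
  | nil => simp [PySem.Set.update]
  | cons x xs ih =>
    rw [List.nodup_cons] at hnd
    simp only [List.foldl_cons, List.map_cons]
    rw [if_pos (by exact hfresh x (by simp))]
    rw [PySem.Set.update_cons]
    rw [ih (acc ++ [(sp, k, x)]) (PySem.Set.add s (sp, x)) hnd.2 ?_]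
    · simp
    · intro x' hx'
      rw [PySem.Set.mem_add]
      rintro (hin | heq)
      · exact hfresh x' (by simp [hx']) hin
      · have : x' = x := by
          have := Prod.mk.injEq sp x' sp x ▸ heq
          exact (Prod.mk.inj heq).2
        exact hnd.1 (this ▸ hx')

lemma pvOuterFold (k : Int) (d : PySem.Dict Int (List Int)) (L : List (Int × Int))
    (acc : List (Int × Int × Int)) (s : PySem.Set (Int × Int))
    (hb : ∀ h, (d.getD h []).Nodup)
    (hnd : (L.map Prod.snd).Nodup)
    (hfresh : ∀ f ∈ L, ∀ x, (f.2, x) ∉ s) :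
    (L.foldl (fun (st : List (Int × Int × Int) × PySem.Set (Int × Int)) p =>
        (d.getD p.1 []).foldl
          (fun (st2 : List (Int × Int × Int) × PySem.Set (Int × Int)) xpos =>
            if (p.2, xpos) ∉ st2.2 then (st2.1 ++ [(p.2, k, xpos)], PySem.Set.add st2.2 (p.2, xpos))
            else st2) st) (acc, s)).1
      = acc ++ L.flatMap (fun f => (d.getD f.1 []).map (fun x => (f.2, k, x))) := by
  induction L generalizing acc s with
  | nil => simp
  | cons f L ih =>
    rw [List.map_cons, List.nodup_cons] at hnd
    simp only [List.foldl_cons, List.flatMap_cons]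
    rw [pvInnerFold k f.2 (d.getD f.1 []) acc s (hb f.1) (fun x hx => hfresh f (by simp) x)]
    rw [ih _ _ hnd.2 ?_, List.append_assoc]
    intro f' hf' x
    rw [PySem.Set.mem_update]
    rintro (hin | hkey)
    · exact hfresh f' (by simp [hf']) x hin
    · rw [List.mem_map] at hkey
      obtain ⟨y, -, hy⟩ := hkey
      have : f'.2 = f.2 := (Prod.mk.inj hy.symm).1
      exact hnd.1 (this ▸ List.mem_map_of_mem hf')

-- ===== VERDICT (by name: the statement is the Claim_ definition above) =====
theorem find_winnow_matches_spec : Claim_equal_find_winnow_matches := by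
  intro susp src k w _ hpre
  obtain ⟨hk, hrest⟩ := hpre
  unfold Spec_find_winnow_matches
  have hshort : (PySem.Str.len susp < k ∧ PySem.Str.len src < k) →
      find_winnow_matches susp src k w = find_winnow_matches_alt susp src k w := by
    rintro ⟨h1, h2⟩
    replace h1 : (susp.toList.length : Int) < k := by
      have hc : PySem.Str.len susp = (susp.toList.length : Int) := by
        simp [PySem.Str.len_eq]
      rwa [hc] at h1
    replace h2 : (src.toList.length : Int) < k := by
      have hc : PySem.Str.len src = (src.toList.length : Int) := by
        simp [PySem.Str.len_eq]
      rwa [hc] at h2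
    unfold find_winnow_matches find_winnow_matches_alt
    have e1 : pvWinnow susp.toList k w = [] := by unfold pvWinnow; rw [if_pos h1]
    have f1 : pvFingerprints susp.toList k w = [] := by unfold pvFingerprints; rw [if_pos h1]
    rw [e1, f1]
    rfl
  rcases hrest with hw | hboth
  · unfold find_winnow_matches find_winnow_matches_alt
    rw [winnow_eq src.toList k w hk hw]
    have hA : ((pvFingerprints src.toList k w).foldl
        (fun (d : PySem.Dict Int (List Int)) q => d.modify q.1 [] (· ++ [q.2]))
        PySem.Dict.empty) = pvSrcIndex src.toList k w := rfl
    rw [hA]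
    rw [winnow_eq susp.toList k w hk hw] at *
    have h := pvOuterFold k (pvSrcIndex src.toList k w) (pvFingerprints susp.toList k w)
      [] PySem.Set.empty
      (fun h => pvSrcIndex_getD_nodup src.toList k w hk hw h)
      (by rw [← winnow_eq susp.toList k w hk hw]; exact pvWinnow_snd_nodup susp.toList k w hw)
      (by intro f _ x hx; simp [PySem.Set.empty] at hx)
    rw [h]
    rfl
  · exact hshort hboth
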